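-- pv_equiv track=rewrite | github.com/caromedellin/tweets-sounds | chunk.py | getCtype
-- ===== SOURCE A (Python) =====
-- def getCtype(pits):
--     intervals = [pits[i] - pits[i - 1] for i in range(1, len(pits))]
--     if all([i in range(-1,1) for i in intervals]):
--         return 'scalewise'
--     chords = [[i + j for i in [0,2,4]] for j in range(0,7)]
--     for chord in chords:
--         if all([i % 7 in [j % 7 for j in chord] for i in pits]):
--             return 'chordal'
--     return 'other'
-- ===== SOURCE B (Python) =====
-- # Chordal phase rewritten as one bitmask pass: bit j of m says "every pitch seen so far
-- # fits chord j"; no loop over the 7 chords is needed, just a final m != 0 test.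
-- # _MASK[r] has bit j set exactly when residue r belongs to chord {j, j+2, j+4} mod 7,
-- # i.e. j in {r, (r+3)%7, (r+5)%7}.
-- _MASK = [41, 82, 37, 74, 21, 42, 84]
--
-- def getCtype(pits):
--     if pits:
--         prev = pits[0]
--         for cur in pits[1:]:
--             d = cur - prev
--             if d != -1 and d != 0:
--                 break
--             prev = cur
--         else:
--             return 'scalewise'
--     else:
--         return 'scalewise'
--     m = 127
--     for p in pits:
--         m &= _MASK[p % 7]
--     return 'chordal' if m else 'other'
-- ===== Notes on version B (the rewrite author's own statement) =====
-- stated objective: alternative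
-- what changed: The scalewise test becomes an early-exit loop carrying the previous pitch instead of building an interval list, and the chordal phase drops A's loop over the 7 candidate chords entirely: a precomputed 7-entry bitmask table (bit j of _MASK[r] = residue r fits chord j) is AND-folded over the pitches in one pass, and the result is 'chordal' iff the accumulator is nonzero. (one cheap pass instead of building an interval list plus up to 7 list-membership scans).
import Mathlib
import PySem

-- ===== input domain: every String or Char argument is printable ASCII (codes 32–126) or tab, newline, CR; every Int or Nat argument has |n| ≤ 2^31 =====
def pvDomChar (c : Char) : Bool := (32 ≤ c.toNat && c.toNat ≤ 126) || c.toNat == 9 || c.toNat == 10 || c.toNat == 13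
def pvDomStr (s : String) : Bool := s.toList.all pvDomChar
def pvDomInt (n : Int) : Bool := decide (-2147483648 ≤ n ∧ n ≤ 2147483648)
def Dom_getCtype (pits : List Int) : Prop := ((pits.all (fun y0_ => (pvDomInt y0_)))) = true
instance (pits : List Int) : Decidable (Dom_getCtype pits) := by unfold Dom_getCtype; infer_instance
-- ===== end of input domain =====

-- B replaces A's loop over the 7 candidate chords by a single bitmask pass: bit j of the
-- accumulator records "every pitch seen so far fits chord j"; chordal ⟺ accumulator ≠ 0.

-- ===== PORT A =====
-- A's 'for chord in chords' loop with early return 'chordal', else falls through to 'other'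
def getCtypeChordLoop (pits : List Int) : List (List Int) → String
  | [] => "other"
  | chord :: rest =>
    if pits.all (fun i => (chord.map (fun j => PySem.Int.mod j 7)).contains (PySem.Int.mod i 7))
    then "chordal" else getCtypeChordLoop pits rest

def getCtype (pits : List Int) : String :=
  -- pits[i], pits[i-1] with 1 ≤ i < len(pits) are always in range; pyGetD is exact here
  let intervals := (PySem.List.pyRange 1 pits.length 1).map
    (fun i => PySem.List.pyGetD pits i 0 - PySem.List.pyGetD pits (i - 1) 0)
  if intervals.all (fun i => -1 ≤ i && i < 1) then "scalewise"
  else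
    let chords := (PySem.List.pyRange 0 7 1).map (fun j => [0, 2, 4].map (fun i => i + j))
    getCtypeChordLoop pits chords

-- ===== PORT B =====
-- _MASK[r] has bit j set exactly when residue r belongs to chord {j, j+2, j+4} mod 7
def bMASK : List Int := [41, 82, 37, 74, 21, 42, 84]

-- B's 'for cur in pits[1:]' scalewise loop: break on a bad step, for-else means scalewise
def bScaleLoop (prev : Int) : List Int → Bool
  | [] => true
  | cur :: rest => if cur - prev ≠ -1 ∧ cur - prev ≠ 0 then false else bScaleLoop cur rest

def getCtype_alt (pits : List Int) : String :=
  match pits with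
  | [] => "scalewise"
  | p0 :: rest =>
    if bScaleLoop p0 rest then "scalewise"
    else
      -- m = 127; for p in pits: m &= _MASK[p % 7]   (index p % 7 is always in range)
      let m := (p0 :: rest).foldl
        (fun m p => PySem.Int.band m (PySem.List.pyGetD bMASK (PySem.Int.mod p 7) 0)) 127
      if m ≠ 0 then "chordal" else "other"

-- ===== PRECONDITION & SPEC =====
def Spec_getCtype (pits : List Int) (out : String) : Prop := out = getCtype_alt pits
instance (pits : List Int) (out : String) : Decidable (Spec_getCtype pits out) := by unfold Spec_getCtype; infer_instance

-- ===== CLAIM (what is proved, stated in full; the proofs are below) =====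
def Claim_equal_getCtype : Prop := ∀ (pits : List Int), Dom_getCtype pits → Spec_getCtype pits (getCtype pits)

-- ===== LEMMAS AND PROOFS =====

-- Nat-side mask table and the Nat shadow of B's fold (proof-only helpers)
def maskNat (r : Nat) : Nat := [41, 82, 37, 74, 21, 42, 84].getD r 0

def foldNat (pits : List Int) (m : Nat) : Nat :=
  pits.foldl (fun m p => m &&& maskNat (PySem.Int.mod p 7).toNat) m

-- A's interval list equals the zip-of-adjacent-pairs differences
lemma intervals_eq_zip (pits : List Int) :
    (PySem.List.pyRange 1 pits.length 1).map
      (fun i => PySem.List.pyGetD pits i 0 - PySem.List.pyGetD pits (i - 1) 0)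
    = (pits.zip (pits.drop 1)).map (fun p => p.2 - p.1) := by
  apply List.ext_getElem
  · simp [PySem.List.length_pyRange_one]
  · intro k h1 h2
    have hlen : (PySem.List.pyRange 1 (pits.length) 1).length = ((pits.length : Int) - 1).toNat :=
      PySem.List.length_pyRange_one 1 pits.length
    have hk : k + 1 < pits.length := by
      rw [List.length_map, hlen] at h1; omega
    simp only [List.getElem_map, PySem.List.getElem_pyRange_one, List.getElem_zip]
    rw [PySem.List.pyGetD_eq_getElem pits 0 (by omega) (by omega),
        PySem.List.pyGetD_eq_getElem pits 0 (by omega) (by omega)]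
    simp only [show ((1 : Int) + (k : Int)).toNat = k + 1 from by omega,
               show ((1 : Int) + (k : Int) - 1).toNat = k from by omega,
               List.getElem_drop]
    congr 1
    simp [Nat.add_comm 1 k]

-- B's scalewise loop computes A's all-intervals test
lemma bScaleLoop_eq (rest : List Int) : ∀ p : Int,
    bScaleLoop p rest
    = ((p :: rest).zip rest).all (fun q => -1 ≤ q.2 - q.1 && q.2 - q.1 < 1) := by
  induction rest with
  | nil => intro p; rfl
  | cons b t ih =>
    intro p
    simp only [bScaleLoop, List.zip_cons_cons, List.all_cons, ih b]
    split_ifs with h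
    · rw [show (decide (-1 ≤ b - p) && decide (b - p < 1)) = false by
        simp only [Bool.and_eq_false_iff, decide_eq_false_iff_not]; omega]
      rw [Bool.false_and]
    · rw [show (decide (-1 ≤ b - p) && decide (b - p < 1)) = true by
        simp only [Bool.and_eq_true, decide_eq_true_eq]; omega]
      rw [Bool.true_and]

-- the mask lookup in B's port is the Nat table entry
lemma pyGetD_mask (p : Int) :
    PySem.List.pyGetD bMASK (PySem.Int.mod p 7) 0
    = Int.ofNat (maskNat (PySem.Int.mod p 7).toNat) := by
  have h0 : 0 ≤ PySem.Int.mod p 7 := PySem.Int.mod_nonneg p (by norm_num)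
  have h7 : PySem.Int.mod p 7 < 7 := PySem.Int.mod_lt p (by norm_num)
  generalize PySem.Int.mod p 7 = r at h0 h7 ⊢
  interval_cases r <;> rfl

-- B's Int fold is the Nat fold
lemma fold_eq_foldNat (pits : List Int) : ∀ m : Nat,
    pits.foldl (fun m p => PySem.Int.band m (PySem.List.pyGetD bMASK (PySem.Int.mod p 7) 0))
      (Int.ofNat m)
    = Int.ofNat (foldNat pits m) := by
  induction pits with
  | nil => intro m; rfl
  | cons p t ih =>
    intro m
    simp only [List.foldl_cons, foldNat, pyGetD_mask p]
    have : PySem.Int.band (Int.ofNat m) (Int.ofNat (maskNat (PySem.Int.mod p 7).toNat))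
        = Int.ofNat (m &&& maskNat (PySem.Int.mod p 7).toNat) :=
      PySem.Int.band_natCast m _
    rw [this, ih]
    rfl

-- per-bit invariant of the Nat fold
lemma foldNat_testBit (pits : List Int) : ∀ (m : Nat) (j : Nat),
    (foldNat pits m).testBit j
    = (m.testBit j && pits.all (fun p => (maskNat (PySem.Int.mod p 7).toNat).testBit j)) := by
  induction pits with
  | nil => intro m j; simp [foldNat]
  | cons p t ih =>
    intro m j
    simp only [foldNat, List.foldl_cons, List.all_cons]
    rw [show List.foldl (fun m p => m &&& maskNat (PySem.Int.mod p 7).toNat)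
          (m &&& maskNat (PySem.Int.mod p 7).toNat) t
        = foldNat t (m &&& maskNat (PySem.Int.mod p 7).toNat) from rfl, ih]
    rw [Nat.testBit_land]
    cases m.testBit j <;> cases (maskNat (PySem.Int.mod p 7).toNat).testBit j <;> simp

-- bit j of a residue's mask says the residue lies in chord j (A's membership test)
lemma mask_testBit_eq_contains (p : Int) (j : Nat) (hj : j < 7) :
    (maskNat (PySem.Int.mod p 7).toNat).testBit j
    = ([PySem.Int.mod (0 + (j : Int)) 7, PySem.Int.mod (2 + (j : Int)) 7,
        PySem.Int.mod (4 + (j : Int)) 7].contains (PySem.Int.mod p 7)) := by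
  have h0 : 0 ≤ PySem.Int.mod p 7 := PySem.Int.mod_nonneg p (by norm_num)
  have h7 : PySem.Int.mod p 7 < 7 := PySem.Int.mod_lt p (by norm_num)
  generalize PySem.Int.mod p 7 = r at h0 h7 ⊢
  interval_cases r <;> interval_cases j <;> rfl

-- the accumulator stays below 128
lemma foldNat_lt (pits : List Int) : ∀ m : Nat, m < 128 → foldNat pits m < 128 := by
  induction pits with
  | nil => intro m hm; simpa [foldNat] using hm
  | cons p t ih =>
    intro m hm
    exact ih _ (Nat.lt_of_le_of_lt (Nat.and_le_left) hm)

-- a number below 128 is nonzero iff one of bits 0..6 is set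
lemma lt128_ne_zero_iff : ∀ F : Nat, F < 128 →
    ((F ≠ 0) ↔ (F.testBit 0 || F.testBit 1 || F.testBit 2 || F.testBit 3
      || F.testBit 4 || F.testBit 5 || F.testBit 6) = true) := by decide

-- A's chord loop returns 'chordal' iff some chord passes its scan
lemma chordLoop_eq_any (pits : List Int) (l : List (List Int)) :
    getCtypeChordLoop pits l
    = (if l.any (fun chord => pits.all (fun i =>
          (chord.map (fun j => PySem.Int.mod j 7)).contains (PySem.Int.mod i 7)))
       then "chordal" else "other") := by
  induction l with
  | nil => rfl
  | cons c rest ih =>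
    simp only [getCtypeChordLoop, List.any_cons, ih]
    by_cases h : (pits.all (fun i =>
        (c.map (fun j => PySem.Int.mod j 7)).contains (PySem.Int.mod i 7))) = true
    · rw [if_pos h, if_pos (by rw [h, Bool.true_or])]
    · have hx : pits.all (fun i =>
          (c.map (fun j => PySem.Int.mod j 7)).contains (PySem.Int.mod i 7)) = false :=
        Bool.eq_false_iff.mpr h
      rw [if_neg h]; simp only [hx, Bool.false_or]

-- ===== VERDICT (by name: the statement is the Claim_ definition above) =====
theorem getCtype_spec : Claim_equal_getCtype := by
  intro pits _
  unfold Spec_getCtype getCtype getCtype_alt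
  cases pits with
  | nil => rfl
  | cons p0 rest =>
    simp only [intervals_eq_zip, List.all_map, Function.comp_def]
    have hscale : ((p0 :: rest).zip ((p0 :: rest).drop 1)).all
        (fun q => -1 ≤ q.2 - q.1 && q.2 - q.1 < 1) = bScaleLoop p0 rest := by
      rw [bScaleLoop_eq rest p0]; rfl
    rw [hscale]
    by_cases hs : bScaleLoop p0 rest = true
    · simp [hs]
    · simp only [Bool.not_eq_true] at hs
      simp only [hs, Bool.false_eq_true, if_false]
      -- chordal phase
      rw [chordLoop_eq_any]
      have hfold := fold_eq_foldNat (p0 :: rest) 127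
      rw [show ((127 : Int)) = Int.ofNat 127 from rfl, hfold]
      set F := foldNat (p0 :: rest) 127 with hF
      have hFlt : F < 128 := foldNat_lt _ 127 (by norm_num)
      have hbit : ∀ (jn : Nat) (j : Int), jn < 7 → j = (jn : Int) →
          F.testBit jn = (p0 :: rest).all (fun i =>
            ([PySem.Int.mod (0 + j) 7, PySem.Int.mod (2 + j) 7,
              PySem.Int.mod (4 + j) 7].contains (PySem.Int.mod i 7))) := by
        intro jn j hj hh
        subst hh
        rw [hF, foldNat_testBit]
        rw [show (127 : Nat).testBit jn = true from by interval_cases jn <;> rfl, Bool.true_and]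
        congr 1
        funext p
        exact mask_testBit_eq_contains p jn hj
      have hne := lt128_ne_zero_iff F hFlt
      have hany : (((PySem.List.pyRange 0 7 1).map (fun j => [0, 2, 4].map (fun i => i + j))).any
            (fun chord => (p0 :: rest).all (fun i =>
              (chord.map (fun j => PySem.Int.mod j 7)).contains (PySem.Int.mod i 7))))
          = (F.testBit 0 || F.testBit 1 || F.testBit 2 || F.testBit 3 || F.testBit 4
             || F.testBit 5 || F.testBit 6) := by
        rw [show PySem.List.pyRange 0 7 1 = [0, 1, 2, 3, 4, 5, 6] from rfl]
        simp only [List.map_cons, List.map_nil, List.any_cons, List.any_nil, Bool.or_false]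
        rw [← hbit 0 0 (by norm_num) (by norm_num), ← hbit 1 1 (by norm_num) (by norm_num),
            ← hbit 2 2 (by norm_num) (by norm_num), ← hbit 3 3 (by norm_num) (by norm_num),
            ← hbit 4 4 (by norm_num) (by norm_num), ← hbit 5 5 (by norm_num) (by norm_num),
            ← hbit 6 6 (by norm_num) (by norm_num)]
        simp only [Bool.or_assoc]
      rw [hany]
      by_cases hc : F = 0
      · rw [if_neg (fun hh => (hne.mpr hh) hc), if_neg (by simp [hc])]
      · rw [if_pos (hne.mp hc), if_pos (by simpa using hc)]
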